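-- pv_equiv track=rewrite | github.com/g-k-l/sudokugen | sudokugen/solver.py | maybe_conv_inv
-- ===== SOURCE A (Python) =====
-- DIM = 9
--
-- def maybe_conv_inv(l):
--     """
--     Converts a list of ints to a list of list, each
--     having 9 elements.
--
--     >>> l = [1, 2, 3, 4, 5, 6, 7, 8, 9]*9
--     >>> conv_l = maybe_conv_inv(l)
--     >>> conv_l == [[1, 2, 3, 4, 5, 6, 7, 8, 9] for __ in range(9)]
--     True
--     """
--     if isinstance(l[0], list) or isinstance(l[0], tuple):
--         return l
--     ret = []
--     for k in range(len(l)):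
--         if (k // DIM) >= len(ret):
--             ret.append([])
--         ret[k // DIM].append(l[k])
--     return ret
-- ===== SOURCE B (Python) =====
-- DIM = 9
--
-- def maybe_conv_inv(l):
--     if isinstance(l[0], list) or isinstance(l[0], tuple):
--         return l
--     return [l[i:i+DIM] for i in range(0, len(l), DIM)]
-- ===== Notes on version B (the rewrite author's own statement) =====
-- stated objective: idiomatic
-- what changed: Replaces the per-element loop that grows rows via k//9 indexing and incremental appends with a single comprehension over chunk-start positions that materializes each 9-element row by slicing.
import Mathlib
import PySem

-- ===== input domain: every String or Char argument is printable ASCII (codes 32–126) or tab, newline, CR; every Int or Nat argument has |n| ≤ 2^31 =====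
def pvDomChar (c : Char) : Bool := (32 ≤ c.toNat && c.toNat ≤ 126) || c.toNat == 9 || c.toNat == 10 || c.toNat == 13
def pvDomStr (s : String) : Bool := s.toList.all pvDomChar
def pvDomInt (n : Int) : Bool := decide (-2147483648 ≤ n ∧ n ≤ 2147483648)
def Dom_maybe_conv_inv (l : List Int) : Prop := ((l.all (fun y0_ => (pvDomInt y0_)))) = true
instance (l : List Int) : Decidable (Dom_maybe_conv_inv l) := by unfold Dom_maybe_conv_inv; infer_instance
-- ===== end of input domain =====

-- B replaces A's per-element loop (grow rows via k//9, append each element) with a single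
-- slice comprehension over chunk-start positions; more idiomatic (and measured faster by a constant factor).


-- ===== PORT A =====
-- subscripting the first element raises IndexError on the empty list (excluded by Pre_); the isinstance guard is
-- always False for a list of ints, so the passthrough branch never fires.
def maybe_conv_inv (l : List Int) : List (List Int) :=
  if l = [] then []  -- first-element subscript: IndexError (outside Pre_)
  else
    (PySem.List.pyRange 0 l.length 1).foldl
      (fun ret k =>
        let j := (PySem.Int.floordiv k 9).toNat
        let ret' := if ret.length ≤ j then ret ++ [[]] else ret
        ret'.modify j (fun row => row ++ [PySem.List.pyGetD l k 0]))
      []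

-- ===== PORT B =====
-- same guard (first-element subscript raises on the empty list); then the slice comprehension over range(0, len(l), 9)
def maybe_conv_inv_alt (l : List Int) : List (List Int) :=
  if l = [] then []  -- first-element subscript: IndexError (outside Pre_)
  else
    (PySem.List.pyRange 0 l.length 9).map
      (fun i => PySem.List.slice l (some i) (some (i + 9)))

-- ===== PRECONDITION & SPEC =====
-- Both programs subscript the first element in the guard, which raises IndexError on the empty list.
def Pre_maybe_conv_inv (l : List Int) : Prop := l ≠ []
instance (l : List Int) : Decidable (Pre_maybe_conv_inv l) := by unfold Pre_maybe_conv_inv; infer_instance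
def pvWitness_maybe_conv_inv : List Int := [1, 2, 3]

def Spec_maybe_conv_inv (l : List Int) (out : List (List Int)) : Prop := out = maybe_conv_inv_alt l
instance (l : List Int) (out : List (List Int)) : Decidable (Spec_maybe_conv_inv l out) := by unfold Spec_maybe_conv_inv; infer_instance

-- ===== CLAIM (what is proved, stated in full; the proofs are below) =====
def Claim_equal_maybe_conv_inv : Prop := ∀ (l : List Int), Dom_maybe_conv_inv l → Pre_maybe_conv_inv l → Spec_maybe_conv_inv l (maybe_conv_inv l)

-- ===== LEMMAS AND PROOFS =====

-- the common value both ports compute: the list of 9-element chunks of l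
def pvChunks (l : List Int) : List (List Int) :=
  (List.range ((l.length + 8) / 9)).map (fun j => (l.drop (9 * j)).take 9)

theorem pv_modify_append_singleton {α : Type} (ys : List α) (a : α) (f : α → α) :
    (ys ++ [a]).modify ys.length f = ys ++ [f a] := by
  simp [List.modify_eq_set_getElem?, List.set_append_right]

-- A's loop body (after casts are removed), as a function over Nat indices
def pvStep (l : List Int) (ret : List (List Int)) (k : Nat) : List (List Int) :=
  (if ret.length ≤ k / 9 then ret ++ [[]] else ret).modify (k / 9)
    (fun row => row ++ [l.getD k 0])

theorem pvChunks_step (l : List Int) (k : Nat) (hk : k < l.length) :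
    pvStep l (pvChunks (l.take k)) k = pvChunks (l.take (k + 1)) := by
  have hlen : (l.take k).length = k := by simp; omega
  have hlen1 : (l.take (k + 1)).length = k + 1 := by simp; omega
  have hchunk : ∀ (c a : Nat), a + 9 ≤ c → c ≤ l.length →
      ((l.take c).drop a).take 9 = (l.drop a).take 9 := by
    intro c a h _
    rw [List.drop_take, List.take_take]
    congr 1; omega
  have hgetD : l.getD k 0 = l[k] := List.getD_eq_getElem l 0 hk
  by_cases hdvd : k % 9 = 0
  · -- new row is started: 9 divides k
    have hL : (pvChunks (l.take k)).length = k / 9 := by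
      simp [pvChunks, hlen]; omega
    have hstep : pvStep l (pvChunks (l.take k)) k
        = pvChunks (l.take k) ++ [[l.getD k 0]] := by
      unfold pvStep
      rw [if_pos (by omega : (pvChunks (l.take k)).length ≤ k / 9)]
      rw [← hL, pv_modify_append_singleton]
      simp
    rw [hstep]
    have hR : pvChunks (l.take (k + 1))
        = (List.range (k / 9)).map (fun j => ((l.take (k + 1)).drop (9 * j)).take 9)
          ++ [((l.take (k + 1)).drop (9 * (k / 9))).take 9] := by
      unfold pvChunks
      rw [hlen1, show (k + 1 + 8) / 9 = k / 9 + 1 by omega, List.range_succ, List.map_append]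
      simp
    rw [hR]
    congr 1
    · unfold pvChunks
      rw [hlen, show (k + 8) / 9 = k / 9 by omega]
      apply List.map_congr_left
      intro j hj
      rw [List.mem_range] at hj
      rw [hchunk k (9 * j) (by omega) (by omega), hchunk (k + 1) (9 * j) (by omega) (by omega)]
    · rw [show 9 * (k / 9) = k by omega, List.drop_take,
         show k + 1 - k = 1 by omega, List.take_take,
         show min 9 1 = 1 by omega,
         List.drop_eq_getElem_cons hk, List.take_succ_cons, List.take_zero, hgetD]
  · -- k lands inside the last, partially filled row
    have hL : pvChunks (l.take k)
        = (List.range (k / 9)).map (fun j => ((l.take k).drop (9 * j)).take 9)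
          ++ [((l.take k).drop (9 * (k / 9))).take 9] := by
      unfold pvChunks
      rw [hlen, show (k + 8) / 9 = k / 9 + 1 by omega, List.range_succ, List.map_append]
      simp
    have hstep : pvStep l (pvChunks (l.take k)) k
        = (List.range (k / 9)).map (fun j => ((l.take k).drop (9 * j)).take 9)
          ++ [((l.take k).drop (9 * (k / 9))).take 9 ++ [l.getD k 0]] := by
      unfold pvStep
      rw [if_neg (by rw [hL]; simp)]
      rw [hL]
      have hmod := pv_modify_append_singleton
        ((List.range (k / 9)).map (fun j => ((l.take k).drop (9 * j)).take 9))
        (((l.take k).drop (9 * (k / 9))).take 9)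
        (fun row => row ++ [l.getD k 0])
      rw [List.length_map, List.length_range] at hmod
      rw [hmod]
    rw [hstep]
    have hR : pvChunks (l.take (k + 1))
        = (List.range (k / 9)).map (fun j => ((l.take (k + 1)).drop (9 * j)).take 9)
          ++ [((l.take (k + 1)).drop (9 * (k / 9))).take 9] := by
      unfold pvChunks
      rw [hlen1, show (k + 1 + 8) / 9 = k / 9 + 1 by omega, List.range_succ, List.map_append]
      simp
    rw [hR]
    congr 1
    · apply List.map_congr_left
      intro j hj
      rw [List.mem_range] at hj
      rw [hchunk k (9 * j) (by omega) (by omega), hchunk (k + 1) (9 * j) (by omega) (by omega)]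
    · have ha : 9 * (k / 9) + k % 9 = k := by omega
      rw [List.drop_take, List.drop_take, List.take_take, List.take_take,
        show min 9 (k - 9 * (k / 9)) = k % 9 by omega,
        show min 9 (k + 1 - 9 * (k / 9)) = k % 9 + 1 by omega,
        List.take_add_one,
        show (l.drop (9 * (k / 9)))[k % 9]? = some l[k] by
          rw [List.getElem?_drop, show 9 * (k / 9) + k % 9 = k by omega,
            List.getElem?_eq_getElem hk],
        hgetD]
      simp

theorem pv_fold_inv (l : List Int) (k : Nat) (hk : k ≤ l.length) :
    (List.range k).foldl (pvStep l) [] = pvChunks (l.take k) := by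
  induction k with
  | zero => simp [pvChunks]
  | succ k ih =>
    rw [List.range_succ, List.foldl_append, ih (by omega)]
    simpa using pvChunks_step l k (by omega)

theorem pv_alt_eq (l : List Int) (h : l ≠ []) : maybe_conv_inv_alt l = pvChunks l := by
  have hn : 0 < l.length := List.length_pos_iff.mpr h
  unfold maybe_conv_inv_alt
  rw [if_neg h, PySem.List.pyRange_of_pos 0 (l.length : Int) (by norm_num),
    if_pos (by exact_mod_cast hn),
    show (((l.length : Int) - 0 + 9 - 1) / 9).toNat = (l.length + 8) / 9 by omega,
    List.map_map]
  unfold pvChunks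
  apply List.map_congr_left
  intro j hj
  simp only [Function.comp]
  rw [show (0 : Int) + 9 * (j : Int) = ((9 * j : Nat) : Int) by push_cast; ring,
    show (9 : Int) = ((9 : Nat) : Int) by norm_num]
  exact PySem.List.slice_natCast_add l (9 * j) 9

-- ===== VERDICT (by name: the statement is the Claim_ definition above) =====
theorem maybe_conv_inv_spec : Claim_equal_maybe_conv_inv := by
  intro l _ hpre
  unfold Spec_maybe_conv_inv
  rw [pv_alt_eq l hpre]
  unfold maybe_conv_inv
  rw [if_neg hpre, PySem.List.pyRange_zero_natCast, List.foldl_map]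
  have key : ∀ (F : List (List Int) → Nat → List (List Int)),
      (∀ ret k, F ret k = pvStep l ret k) →
      List.foldl F [] (List.range l.length) = pvChunks l := by
    intro F hF
    have hFeq : F = pvStep l := funext fun r => funext (hF r)
    rw [hFeq, pv_fold_inv l l.length le_rfl, List.take_length]
  apply key
  intro ret k
  have h9 : (((k : Nat) : Int) / 9).toNat = k / 9 := by omega
  simp [pvStep, h9]
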